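-- pv_equiv track=rewrite | github.com/HerbeMalveillante/DepartKNN | KNN_departement_V1.py | maxDic
-- ===== SOURCE A (Python) =====
-- def maxDic(dic):
--     """
--     Fontion qui renvoi la ou les clé du dico qui contiennent la plus grande liste
--     Cette fonction renvoi une liste de clé.
--     """
--
--     #on teste la longueur des listes et on créée une nouvelle liste (plusGrandesListes) qui contient la ou les listes les plus longues.
--     listeListes = []
--     plusGrandesListes = []
--     lenInt = 0
--     for list in dic :
--         if len(dic[list]) > lenInt :
--             plusGrandesListes = []
--             plusGrandesListes.append(dic[list])
--             lenInt = len(dic[list])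
--
--         elif len(dic[list]) == lenInt :
--             plusGrandesListes.append(dic[list])
--
--     #on doit maintenant chercher dans dictionnaire le ou les index correspondant à la ou les listes retournées et à les mettre dans une liste.
--     listeFinal = []
--
--     for i in dic :
--         if dic[i] in plusGrandesListes :
--             listeFinal.append(i)
--
--     return listeFinal
-- ===== SOURCE B (Python) =====
-- def maxDic(dic):
--     # Group keys by the length of their list, then return the bucket of the largest length.
--     groups = {}
--     for k in dic:
--         groups.setdefault(len(dic[k]), []).append(k)
--     if not groups:
--         return []
--     return groups[max(groups)]
-- ===== Notes on version B (the rewrite author's own statement) =====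
-- stated objective: faster
-- what changed: B replaces A's running-max loop collecting the longest value-lists plus a second pass testing each value's list-membership against that collection with a single grouping pass building a length->keys dict index, returning the bucket of the maximum length.
import Mathlib
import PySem

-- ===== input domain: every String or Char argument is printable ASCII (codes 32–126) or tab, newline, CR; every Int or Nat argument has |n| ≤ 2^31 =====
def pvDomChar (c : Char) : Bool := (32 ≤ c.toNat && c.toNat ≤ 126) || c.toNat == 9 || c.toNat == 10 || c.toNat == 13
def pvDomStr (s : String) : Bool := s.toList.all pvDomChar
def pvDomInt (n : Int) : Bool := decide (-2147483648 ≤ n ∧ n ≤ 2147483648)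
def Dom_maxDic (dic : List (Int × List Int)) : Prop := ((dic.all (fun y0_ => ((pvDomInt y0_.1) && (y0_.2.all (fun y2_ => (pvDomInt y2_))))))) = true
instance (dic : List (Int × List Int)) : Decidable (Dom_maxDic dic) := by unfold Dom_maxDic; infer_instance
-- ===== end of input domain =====

-- B groups keys by the length of their list in one dict-building pass and returns the
-- bucket of the maximum length, instead of A's running-max collection of the longest
-- value-lists followed by a second membership-testing pass; objective: simpler.

-- dic[k]: first-match association-list lookup (the dict convention; k always comes from dic's keys here)
def pvVal (dic : List (Int × List Int)) (k : Int) : List Int :=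
  ((dic.find? (fun p => p.1 == k)).map Prod.snd).getD []

-- len(dic[k]) as a Python int
def pvLen (dic : List (Int × List Int)) (k : Int) : Int := ((pvVal dic k).length : Int)

-- ===== PORT A =====
def maxDic (dic : List (Int × List Int)) : List Int :=
  let keys := dic.map Prod.fst
  -- first loop: running max length lenInt with the list plusGrandesListes of longest lists so far
  let st := keys.foldl
    (fun (st : List (List Int) × Int) k =>
      if pvLen dic k > st.2 then ([pvVal dic k], pvLen dic k)
      else if pvLen dic k = st.2 then (st.1 ++ [pvVal dic k], st.2)
      else st)
    ([], 0)
  -- second loop: keys whose value is in plusGrandesListes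
  keys.foldl (fun acc k => if pvVal dic k ∈ st.1 then acc ++ [k] else acc) []

-- ===== PORT B =====
def maxDic_alt (dic : List (Int × List Int)) : List Int :=
  let groups := (dic.map Prod.fst).foldl
    (fun (g : PySem.Dict Int (List Int)) k =>
      g.modify (pvLen dic k) [] (fun l => l ++ [k]))
    PySem.Dict.empty
  if groups.size = 0 then []
  else
    match PySem.List.max? groups.keys (fun x => x) with
    | some m => groups.getD m []
    | none => []

-- ===== PRECONDITION & SPEC =====
def Spec_maxDic (dic : List (Int × List Int)) (out : List Int) : Prop := out = maxDic_alt dic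
instance (dic : List (Int × List Int)) (out : List Int) : Decidable (Spec_maxDic dic out) := by unfold Spec_maxDic; infer_instance

-- ===== CLAIM (what is proved, stated in full; the proofs are below) =====
def Claim_equal_maxDic : Prop := ∀ (dic : List (Int × List Int)), Dom_maxDic dic → Spec_maxDic dic (maxDic dic)

-- ===== LEMMAS AND PROOFS =====

-- the running maximum of the lengths of ks's lists, seeded with m
def runMax (dic : List (Int × List Int)) (ks : List Int) (m : Int) : Int :=
  ks.foldl (fun a k => max a (pvLen dic k)) m

theorem runMax_cons (dic : List (Int × List Int)) (k : Int) (t : List Int) (m : Int) :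
    runMax dic (k :: t) m = runMax dic t (max m (pvLen dic k)) := by
  simp [runMax]

theorem le_runMax (dic : List (Int × List Int)) (t : List Int) (a : Int) :
    a ≤ runMax dic t a := by
  rw [runMax, ← List.foldl_map]
  exact (PySem.List.le_foldl_max (t.map (pvLen dic)) a).1

-- A's first loop: characterisation by the running max
theorem maxDic_loop1 (dic : List (Int × List Int)) :
    ∀ (ks : List Int) (pg : List (List Int)) (m : Int),
      ks.foldl
        (fun (st : List (List Int) × Int) k =>
          if pvLen dic k > st.2 then ([pvVal dic k], pvLen dic k)
          else if pvLen dic k = st.2 then (st.1 ++ [pvVal dic k], st.2)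
          else st) (pg, m)
      = ((if m = runMax dic ks m then pg else [])
          ++ (ks.filter (fun k => pvLen dic k = runMax dic ks m)).map (pvVal dic),
         runMax dic ks m) := by
  intro ks
  induction ks with
  | nil => intro pg m; simp [runMax]
  | cons k t ih =>
    intro pg m
    simp only [List.foldl_cons]
    rw [runMax_cons, List.filter_cons]
    by_cases h1 : pvLen dic k > m
    · have hmx : max m (pvLen dic k) = pvLen dic k := by omega
      rw [if_pos h1, ih, hmx,
          if_neg (show ¬ m = runMax dic t (pvLen dic k) by
            have := le_runMax dic t (pvLen dic k); omega)]
      by_cases h2 : pvLen dic k = runMax dic t (pvLen dic k)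
      · rw [if_pos h2, if_pos (show (decide (pvLen dic k = runMax dic t (pvLen dic k))) = true by
          simpa using h2)]
        simp
      · rw [if_neg h2, if_neg (show ¬ (decide (pvLen dic k = runMax dic t (pvLen dic k))) = true by
          simpa using h2)]
    · have hmx : max m (pvLen dic k) = m := by omega
      rw [if_neg h1, hmx]
      by_cases h2 : pvLen dic k = m
      · rw [if_pos h2, ih]
        by_cases h3 : m = runMax dic t m
        · rw [if_pos h3, if_pos (show (decide (pvLen dic k = runMax dic t m)) = true by
            simp [h2, ← h3]), if_pos h3]
          simp
        · rw [if_neg h3, if_neg (show ¬ (decide (pvLen dic k = runMax dic t m)) = true by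
            have := le_runMax dic t m; simp only [decide_eq_true_eq]; omega), if_neg h3]
      · rw [if_neg h2, ih,
            if_neg (show ¬ (decide (pvLen dic k = runMax dic t m)) = true by
              have := le_runMax dic t m; simp only [decide_eq_true_eq]; omega)]

-- the running max over a nonempty key list is attained by some key's length
theorem runMax_attained (dic : List (Int × List Int)) (k : Int) (t : List Int) :
    runMax dic t (max 0 (pvLen dic k)) ∈ (k :: t).map (pvLen dic) := by
  induction t generalizing k with
  | nil => simp [runMax, pvLen]
  | cons k' t ih =>
    rw [runMax_cons]
    rcases le_total (max 0 (pvLen dic k)) (max 0 (pvLen dic k')) with h | h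
    · have hmx : max (max 0 (pvLen dic k)) (pvLen dic k') = max 0 (pvLen dic k') := by
        simp only [pvLen] at h ⊢; omega
      rw [hmx]
      have := ih k'
      simp only [List.map_cons, List.mem_cons] at this ⊢
      tauto
    · have hmx : max (max 0 (pvLen dic k)) (pvLen dic k') = max 0 (pvLen dic k) := by
        simp only [pvLen] at h ⊢; omega
      rw [hmx]
      have := ih k
      simp only [List.map_cons, List.mem_cons] at this ⊢
      tauto

-- A's result: keys whose length is the overall max
theorem maxDic_eq_filter (dic : List (Int × List Int)) :
    maxDic dic = (dic.map Prod.fst).filter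
      (fun k => pvLen dic k = runMax dic (dic.map Prod.fst) 0) := by
  simp only [maxDic]
  rw [maxDic_loop1]
  set keys := dic.map Prod.fst with hkeys
  set M := runMax dic keys 0 with hM
  set pg := (keys.filter (fun k => pvLen dic k = M)).map (pvVal dic) with hpg
  simp only [ite_self, List.nil_append]
  have hfun : (fun (acc : List Int) k => if pvVal dic k ∈ pg then acc ++ [k] else acc)
      = (fun acc k => if decide (pvVal dic k ∈ pg) = true then acc ++ [id k] else acc) := by
    funext acc k; simp
  rw [hfun, PySem.List.foldl_append_if]
  simp only [List.map_id, List.nil_append]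
  apply List.filter_congr
  intro k hk
  rw [decide_eq_decide, hpg]
  constructor
  · intro hmem
    obtain ⟨k', hk', hval⟩ := List.mem_map.mp hmem
    have hlen := (List.mem_filter.mp hk').2
    simp only [decide_eq_true_eq] at hlen
    rw [pvLen, ← hval, ← pvLen]
    exact hlen
  · intro h
    exact List.mem_map.mpr ⟨k, List.mem_filter.mpr ⟨hk, by simpa using h⟩, rfl⟩

-- B's groups bucket at any length c collects exactly the keys with that length, in order
theorem maxDic_groups_getD (dic : List (Int × List Int)) (c : Int) :
    ((dic.map Prod.fst).foldl
      (fun (g : PySem.Dict Int (List Int)) k => g.modify (pvLen dic k) [] (fun l => l ++ [k]))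
      PySem.Dict.empty).getD c []
    = (dic.map Prod.fst).filter (fun k => pvLen dic k = c) := by
  have h1 : (dic.map Prod.fst).foldl
      (fun (g : PySem.Dict Int (List Int)) k => g.modify (pvLen dic k) [] (fun l => l ++ [k]))
      PySem.Dict.empty
    = ((dic.map Prod.fst).map (fun k => (pvLen dic k, k))).foldl
      (fun (g : PySem.Dict Int (List Int)) p => g.modify p.1 [] (fun l => l ++ [p.2]))
      PySem.Dict.empty :=
    Eq.symm List.foldl_map
  rw [h1, PySem.Dict.getD_foldl_modify_append]
  simp only [PySem.Dict.getD_empty, List.nil_append, List.filter_map, List.map_map,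
    Function.comp_def]
  rfl

-- B's max(groups) is the overall running max when there is at least one key
theorem maxDic_groups_max (dic : List (Int × List Int)) (k0 : Int) (t : List Int) :
    PySem.List.max? (PySem.Set.ofList ((k0 :: t).map (pvLen dic)) : List Int) (fun x => x)
      = some (runMax dic (k0 :: t) 0) := by
  set M := runMax dic (k0 :: t) 0 with hMdef
  have hM_mem : M ∈ (k0 :: t).map (pvLen dic) := by
    have : M = runMax dic t (max 0 (pvLen dic k0)) := by rw [hMdef, runMax_cons]
    rw [this]
    exact runMax_attained dic k0 t
  have hM_ub : ∀ y ∈ (k0 :: t).map (pvLen dic), y ≤ M := by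
    intro y hy
    rw [hMdef, runMax, ← List.foldl_map]
    exact (PySem.List.le_foldl_max ((k0 :: t).map (pvLen dic)) 0).2 y hy
  obtain ⟨m, hm⟩ : ∃ m, PySem.List.max? (PySem.Set.ofList ((k0 :: t).map (pvLen dic)) : List Int) (fun x => x) = some m := by
    cases hcase : PySem.List.max? (PySem.Set.ofList ((k0 :: t).map (pvLen dic)) : List Int) (fun x => x) with
    | none =>
      exfalso
      have hnil := (PySem.List.max?_eq_none_iff _ _).mp hcase
      have hmem : pvLen dic k0 ∈ (PySem.Set.ofList ((k0 :: t).map (pvLen dic)) : List Int) := by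
        rw [PySem.Set.mem_ofList]; simp
      rw [hnil] at hmem
      exact absurd hmem (List.not_mem_nil)
    | some m => exact ⟨m, rfl⟩
  rw [hm]
  have hm_mem : m ∈ (k0 :: t).map (pvLen dic) := by
    have := PySem.List.max?_mem hm
    rwa [PySem.Set.mem_ofList] at this
  have hm_ub : ∀ y ∈ (k0 :: t).map (pvLen dic), y ≤ m := fun y hy =>
    PySem.List.max?_isMax hm y (by rwa [PySem.Set.mem_ofList])
  rw [le_antisymm (hM_ub m hm_mem) (hm_ub M hM_mem)]

-- B's groups has exactly the distinct lengths as keys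
theorem maxDic_groups_keys (dic : List (Int × List Int)) :
    ((dic.map Prod.fst).foldl
      (fun (g : PySem.Dict Int (List Int)) k => g.modify (pvLen dic k) [] (fun l => l ++ [k]))
      PySem.Dict.empty).keys
    = PySem.Set.ofList ((dic.map Prod.fst).map (pvLen dic)) := by
  have h := PySem.Dict.keys_foldl_modify_key (dic.map Prod.fst) (fun k => pvLen dic k)
    ([] : List Int) (fun _ k l => l ++ [k]) (PySem.Dict.empty : PySem.Dict Int (List Int))
  rw [h, PySem.Dict.keys_empty, PySem.Set.update_nil_left]

-- ===== VERDICT (by name: the statement is the Claim_ definition above) =====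
theorem maxDic_spec : Claim_equal_maxDic := by
  intro dic _
  unfold Spec_maxDic
  rw [maxDic_eq_filter]
  simp only [maxDic_alt]
  cases hkeys : dic.map Prod.fst with
  | nil =>
    have hdic : dic = [] := by
      cases dic with
      | nil => rfl
      | cons p t => simp at hkeys
    subst hdic
    rfl
  | cons k0 t =>
    have hkeysEq := maxDic_groups_keys dic
    rw [hkeys] at hkeysEq
    have hsize : ((k0 :: t).foldl
        (fun (g : PySem.Dict Int (List Int)) k => g.modify (pvLen dic k) [] (fun l => l ++ [k]))
        PySem.Dict.empty).size ≠ 0 := by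
      intro hzero
      have hitems : ((k0 :: t).foldl
          (fun (g : PySem.Dict Int (List Int)) k => g.modify (pvLen dic k) [] (fun l => l ++ [k]))
          PySem.Dict.empty).items = [] := List.eq_nil_of_length_eq_zero hzero
      have hk : ((k0 :: t).foldl
          (fun (g : PySem.Dict Int (List Int)) k => g.modify (pvLen dic k) [] (fun l => l ++ [k]))
          PySem.Dict.empty).keys = [] := by
        simp only [PySem.Dict.keys, hitems, List.map_nil]
      rw [hkeysEq] at hk
      have hmem : pvLen dic k0 ∈ (PySem.Set.ofList ((k0 :: t).map (pvLen dic)) : List Int) := by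
        rw [PySem.Set.mem_ofList]; simp
      rw [hk] at hmem
      exact absurd hmem (List.not_mem_nil)
    rw [if_neg hsize, hkeysEq, maxDic_groups_max dic k0 t]
    have hg := maxDic_groups_getD dic (runMax dic (k0 :: t) 0)
    rw [hkeys] at hg
    exact hg.symm
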